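-- pv_equiv track=rewrite | github.com/averkij/lingtrain-aligner-editor | be/lingtrain_aligner/aligner.py | handle_paragraph_marks
-- ===== SOURCE A (Python) =====
-- def handle_paragraph_marks(lines, mark):
--     res = []
--     par_count = 0
--     for line in lines:
--         if line.endswith((mark+".", mark+"!", mark+"?")):
--             par_count += 1
--             line = line.replace(mark, "")
--         res.append((line, par_count))
--     return res
-- ===== SOURCE B (Python) =====
-- def handle_paragraph_marks(lines, mark):
--     endings = (mark + ".", mark + "!", mark + "?")
--     flags = [line.endswith(endings) for line in lines]
--     # inclusive prefix sums of the flags = paragraph count at each line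
--     counts = []
--     total = 0
--     for f in flags:
--         total += f
--         counts.append(total)
--     return [((line.replace(mark, "") if f else line), c)
--             for line, f, c in zip(lines, flags, counts)]
-- ===== Notes on version B (the rewrite author's own statement) =====
-- stated objective: alternative
-- what changed: Replaces the single stateful loop threading par_count with three passes: a per-line end-mark flag list, an inclusive prefix sum of the flags, and a zip that builds the (stripped-line, count) pairs; the endings tuple is built once instead of via three string concatenations per line.
import Mathlib
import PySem

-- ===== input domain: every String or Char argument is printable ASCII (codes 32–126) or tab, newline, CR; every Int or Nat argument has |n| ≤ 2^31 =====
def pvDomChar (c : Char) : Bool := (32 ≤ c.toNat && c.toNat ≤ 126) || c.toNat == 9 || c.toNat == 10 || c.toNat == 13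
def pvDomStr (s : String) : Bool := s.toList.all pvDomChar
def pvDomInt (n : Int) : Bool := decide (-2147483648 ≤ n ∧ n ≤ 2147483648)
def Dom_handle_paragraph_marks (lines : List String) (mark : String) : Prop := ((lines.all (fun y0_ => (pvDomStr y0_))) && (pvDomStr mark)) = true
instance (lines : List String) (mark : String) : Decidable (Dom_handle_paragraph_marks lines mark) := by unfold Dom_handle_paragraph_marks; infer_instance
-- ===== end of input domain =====

-- B replaces A's single stateful loop by three passes (flags, inclusive prefix sums, zip-build); same cost, different decomposition.

-- ===== PORT A =====
-- A's loop: state (res, par_count), appending to res each iteration.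
def handle_paragraph_marks (lines : List String) (mark : String) : List (String × Int) :=
  (lines.foldl (fun (st : List (String × Int) × Int) line =>
      if PySem.Str.endswith line (mark ++ ".") || PySem.Str.endswith line (mark ++ "!")
          || PySem.Str.endswith line (mark ++ "?") then
        (st.1 ++ [(PySem.Str.replace line mark "", st.2 + 1)], st.2 + 1)
      else
        (st.1 ++ [(line, st.2)], st.2)) ([], 0)).1

-- ===== PORT B =====
-- pass 1: per-line flag
def pvFlag (mark line : String) : Bool :=
  PySem.Str.endswith line (mark ++ ".") || PySem.Str.endswith line (mark ++ "!")
    || PySem.Str.endswith line (mark ++ "?")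

-- pass 2: inclusive prefix sums of the flags (B's `total` loop)
def pvPrefixSums (flags : List Bool) (total : Int) : List Int :=
  match flags with
  | [] => []
  | f :: fs =>
    let total' := total + (if f then 1 else 0)
    total' :: pvPrefixSums fs total'

-- pass 3: zip-build
def handle_paragraph_marks_alt (lines : List String) (mark : String) : List (String × Int) :=
  let flags := lines.map (pvFlag mark)
  let counts := pvPrefixSums flags 0
  (lines.zip (flags.zip counts)).map
    (fun lfc => ((if lfc.2.1 then PySem.Str.replace lfc.1 mark "" else lfc.1), lfc.2.2))

-- ===== PRECONDITION & SPEC =====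
def Spec_handle_paragraph_marks (lines : List String) (mark : String) (out : List (String × Int)) : Prop := out = handle_paragraph_marks_alt lines mark
instance (lines : List String) (mark : String) (out : List (String × Int)) : Decidable (Spec_handle_paragraph_marks lines mark out) := by unfold Spec_handle_paragraph_marks; infer_instance

-- ===== CLAIM (what is proved, stated in full; the proofs are below) =====
def Claim_equal_handle_paragraph_marks : Prop := ∀ (lines : List String) (mark : String), Dom_handle_paragraph_marks lines mark → Spec_handle_paragraph_marks lines mark (handle_paragraph_marks lines mark)

-- ===== LEMMAS AND PROOFS =====
-- B's three passes, fused into one recursion for the purpose of the proof.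
lemma alt_cons (mark l : String) (ls : List String) (c : Int) :
    ((l :: ls).zip (((l :: ls).map (pvFlag mark)).zip (pvPrefixSums ((l :: ls).map (pvFlag mark)) c))).map
      (fun lfc => ((if lfc.2.1 then PySem.Str.replace lfc.1 mark "" else lfc.1), lfc.2.2))
    = ((if pvFlag mark l then PySem.Str.replace l mark "" else l), c + (if pvFlag mark l then 1 else 0)) ::
      ((ls.zip ((ls.map (pvFlag mark)).zip (pvPrefixSums (ls.map (pvFlag mark)) (c + (if pvFlag mark l then 1 else 0))))).map
        (fun lfc => ((if lfc.2.1 then PySem.Str.replace lfc.1 mark "" else lfc.1), lfc.2.2))) := by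
  simp [pvPrefixSums]

lemma foldA_eq (mark : String) (lines : List String) :
    ∀ (acc : List (String × Int)) (c : Int),
    (lines.foldl (fun (st : List (String × Int) × Int) line =>
      if PySem.Str.endswith line (mark ++ ".") || PySem.Str.endswith line (mark ++ "!")
          || PySem.Str.endswith line (mark ++ "?") then
        (st.1 ++ [(PySem.Str.replace line mark "", st.2 + 1)], st.2 + 1)
      else
        (st.1 ++ [(line, st.2)], st.2)) (acc, c)).1
    = acc ++ ((lines.zip ((lines.map (pvFlag mark)).zip (pvPrefixSums (lines.map (pvFlag mark)) c))).map
        (fun lfc => ((if lfc.2.1 then PySem.Str.replace lfc.1 mark "" else lfc.1), lfc.2.2))) := by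
  induction lines with
  | nil => intro acc c; simp
  | cons l ls ih =>
    intro acc c
    rw [alt_cons]
    by_cases h : pvFlag mark l = true
    · have h' : (PySem.Str.endswith l (mark ++ ".") || PySem.Str.endswith l (mark ++ "!")
          || PySem.Str.endswith l (mark ++ "?")) = true := h
      simp only [List.foldl_cons, h', h, if_true]
      rw [ih]
      simp
    · have h' : (PySem.Str.endswith l (mark ++ ".") || PySem.Str.endswith l (mark ++ "!")
          || PySem.Str.endswith l (mark ++ "?")) = false := by
        simpa [pvFlag] using h
      simp only [List.foldl_cons, h', Bool.false_eq_true, if_false, h, if_false]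
      rw [ih]
      simp

-- ===== VERDICT (by name: the statement is the Claim_ definition above) =====
theorem handle_paragraph_marks_spec : Claim_equal_handle_paragraph_marks := by
  intro lines mark _
  unfold Spec_handle_paragraph_marks handle_paragraph_marks handle_paragraph_marks_alt
  simpa using foldA_eq mark lines [] 0
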